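-- pv_equiv track=rewrite | github.com/Jaydenho99/Deterministic-Finite-Automata | app.py | calc_occurrence_count
-- ===== SOURCE A (Python) =====
-- def calc_occurrence_count(substrings_found,sentence):
--     occurrence_count = {}
--     # Calculate and display occurrence count
--     for substring in substrings_found:
--         count=sentence.count(substring)
--         if substring in occurrence_count:
--             occurrence_count[substring]+=count
--         else:
--             occurrence_count[substring]=count
--     return occurrence_count
-- ===== SOURCE B (Python) =====
-- def calc_occurrence_count(substrings_found, sentence):
--     # Table-first decomposition: one pass of dict.fromkeys gives the distinct
--     # substrings in first-appearance order; each is counted once and multiplied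
--     # by its multiplicity, eliminating the accumulate-with-if/else loop.
--     return {s: sentence.count(s) * substrings_found.count(s)
--             for s in dict.fromkeys(substrings_found)}
-- ===== Notes on version B (the rewrite author's own statement) =====
-- stated objective: simpler
-- what changed: Replaces the accumulate-into-dict loop with if/else membership by a dict comprehension over the deduplicated list (dict.fromkeys), computing each distinct substring's value once as sentence.count(s) * list multiplicity.
import Mathlib
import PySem

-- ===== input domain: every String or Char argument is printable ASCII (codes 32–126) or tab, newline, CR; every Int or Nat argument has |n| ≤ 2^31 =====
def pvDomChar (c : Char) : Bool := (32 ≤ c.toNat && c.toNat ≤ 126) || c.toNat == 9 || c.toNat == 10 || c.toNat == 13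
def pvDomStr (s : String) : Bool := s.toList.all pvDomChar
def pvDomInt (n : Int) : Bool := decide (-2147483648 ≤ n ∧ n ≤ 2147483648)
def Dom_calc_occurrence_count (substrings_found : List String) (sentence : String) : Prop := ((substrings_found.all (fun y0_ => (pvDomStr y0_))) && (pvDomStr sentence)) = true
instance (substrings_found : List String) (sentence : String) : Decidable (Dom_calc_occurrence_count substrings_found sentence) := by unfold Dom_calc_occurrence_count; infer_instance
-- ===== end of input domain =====

-- B replaces A's accumulate-into-dict loop (if/else on membership) by a single map over the
-- deduplicated list, computing sentence.count(s) * multiplicity once per distinct substring (objective: simpler).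


-- ===== PORT A =====
-- literal port of A: fold the list into a dict, branching on membership, return its items
def calc_occurrence_count (substrings_found : List String) (sentence : String) : List (String × Int) :=
  (substrings_found.foldl
    (fun (d : PySem.Dict String Int) substring =>
      let count : Int := (PySem.Str.count sentence substring : Int)
      if d.contains substring then
        d.insert substring (d.getD substring 0 + count)   -- occurrence_count[substring] += count
      else
        d.insert substring count)
    PySem.Dict.empty).items

-- ===== PORT B =====
-- literal port of Source B: dict comprehension over dict.fromkeys(substrings_found)
def calc_occurrence_count_alt (substrings_found : List String) (sentence : String) : List (String × Int) :=
  (PySem.List.dedup substrings_found).map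
    (fun s => (s, (PySem.Str.count sentence s : Int) * (substrings_found.count s : Int)))

-- ===== PRECONDITION & SPEC =====
def Spec_calc_occurrence_count (substrings_found : List String) (sentence : String) (out : List (String × Int)) : Prop := out = calc_occurrence_count_alt substrings_found sentence
instance (substrings_found : List String) (sentence : String) (out : List (String × Int)) : Decidable (Spec_calc_occurrence_count substrings_found sentence out) := by unfold Spec_calc_occurrence_count; infer_instance

-- ===== CLAIM (what is proved, stated in full; the proofs are below) =====
def Claim_equal_calc_occurrence_count : Prop := ∀ (substrings_found : List String) (sentence : String), Dom_calc_occurrence_count substrings_found sentence → Spec_calc_occurrence_count substrings_found sentence (calc_occurrence_count substrings_found sentence)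

-- ===== LEMMAS AND PROOFS =====

-- A's loop body: both branches are the same insert (getD default 0 on a missing key).
theorem pvStepEq (sentence : String) (d : PySem.Dict String Int) (s : String) :
    (let count : Int := (PySem.Str.count sentence s : Int)
     if d.contains s then d.insert s (d.getD s 0 + count) else d.insert s count)
    = d.insert s (d.getD s 0 + (PySem.Str.count sentence s : Int)) := by
  by_cases h : d.contains s = true
  · simp [h]
  · simp only [Bool.not_eq_true] at h
    rw [if_neg (by simp [h]), PySem.Dict.getD_of_not_contains d 0 h, zero_add]

-- value invariant of the unified loop
theorem pvGetD_foldl (cnt : String → Int) (l : List String) (d : PySem.Dict String Int) (v : String) :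
    (l.foldl (fun d x => d.insert x (d.getD x 0 + cnt x)) d).getD v 0
      = d.getD v 0 + cnt v * (l.count v : Int) := by
  induction l generalizing d with
  | nil => simp
  | cons x tl ih =>
    simp only [List.foldl_cons, ih]
    rw [PySem.Dict.getD_insert]
    by_cases hv : v = x
    · subst hv; simp [List.count_cons_self]; ring
    · simp [hv, List.count_cons_of_ne (Ne.symm hv)]

-- ===== VERDICT (by name: the statement is the Claim_ definition above) =====
theorem calc_occurrence_count_spec : Claim_equal_calc_occurrence_count := by
  intro xs sentence _
  unfold Spec_calc_occurrence_count calc_occurrence_count calc_occurrence_count_alt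
  have hstep : (fun (d : PySem.Dict String Int) substring =>
      (let count : Int := (PySem.Str.count sentence substring : Int)
       if d.contains substring then d.insert substring (d.getD substring 0 + count)
       else d.insert substring count))
      = fun (d : PySem.Dict String Int) x => d.insert x (d.getD x 0 + (PySem.Str.count sentence x : Int)) := by
    funext d s; exact pvStepEq sentence d s
  rw [hstep]
  set D := xs.foldl (fun (d : PySem.Dict String Int) x => d.insert x (d.getD x 0 + (PySem.Str.count sentence x : Int))) PySem.Dict.empty with hD
  have hnd : D.keys.Nodup := PySem.Dict.nodup_keys_foldl_insert xs _ _ (by simp)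
  have hkeys : D.keys = PySem.Set.ofList xs := by
    rw [hD, PySem.Dict.keys_foldl_insert]
    simp [PySem.Set.update_nil_left]
  rw [PySem.Dict.items_eq_map_keys D hnd 0, hkeys, PySem.List.dedup_eq_ofList]
  refine List.map_congr_left ?_
  intro s _
  have := pvGetD_foldl (fun x => (PySem.Str.count sentence x : Int)) xs PySem.Dict.empty s
  rw [hD, this]
  simp
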